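-- pv_equiv track=rewrite | github.com/johaneitor/paste12 | contract_shim.py | _set_header
-- ===== SOURCE A (Python) =====
-- from typing import Iterable, List, Tuple
--
-- def _set_header(headers: List[Tuple[str,str]], name: str, value: str):
--     lname = name.lower()
--     out: List[Tuple[str,str]] = []
--     replaced = False
--     for k,v in headers:
--         if k.lower() == lname:
--             if not replaced:
--                 out.append((name, value))
--                 replaced = True
--         else:
--             out.append((k, v))
--     if not replaced:
--         out.append((name, value))
--     return out
-- ===== SOURCE B (Python) =====
-- def _set_header(headers, name, value):
--     lname = name.lower()
--     out = [(k, v) for (k, v) in headers if k.lower() != lname]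
--     pos = next((i for i, (k, _) in enumerate(headers) if k.lower() == lname), None)
--     if pos is None:
--         out.append((name, value))
--     else:
--         out.insert(pos, (name, value))
--     return out
-- ===== Notes on version B (the rewrite author's own statement) =====
-- stated objective: simpler
-- what changed: Replaces the single stateful loop with a replaced-flag by two independent passes: a filter dropping every case-insensitive match plus a first-match index used to insert the new pair (append if absent).
import Mathlib
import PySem

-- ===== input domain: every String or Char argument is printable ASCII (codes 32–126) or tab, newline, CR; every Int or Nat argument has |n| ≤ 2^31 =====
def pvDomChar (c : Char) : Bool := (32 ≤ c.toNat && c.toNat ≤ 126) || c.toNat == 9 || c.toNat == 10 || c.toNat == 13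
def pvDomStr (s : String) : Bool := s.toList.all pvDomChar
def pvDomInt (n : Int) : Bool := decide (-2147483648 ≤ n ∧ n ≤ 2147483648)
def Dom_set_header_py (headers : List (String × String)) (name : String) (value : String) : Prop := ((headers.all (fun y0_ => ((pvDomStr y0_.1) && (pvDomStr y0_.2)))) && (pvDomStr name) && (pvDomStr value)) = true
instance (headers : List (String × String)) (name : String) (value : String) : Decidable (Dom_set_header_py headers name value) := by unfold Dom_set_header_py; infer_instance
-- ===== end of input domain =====

-- B replaces A's single stateful loop (replaced flag) by two independent passes:
-- filter out all case-insensitive matches, then insert the new pair at the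
-- first-match index (append if absent). Objective: simpler decomposition.

-- ===== PORT A =====
-- literal transliteration of A's loop: state (out, replaced), appended in order
def set_header_py (headers : List (String × String)) (name : String) (value : String) : List (String × String) :=
  let lname := PySem.Str.lower name
  let st := headers.foldl
    (fun (st : List (String × String) × Bool) kv =>
      if PySem.Str.lower kv.1 == lname then
        if !st.2 then (st.1 ++ [(name, value)], true) else st
      else
        (st.1 ++ [kv], st.2))
    ([], false)
  if !st.2 then st.1 ++ [(name, value)] else st.1

-- ===== PORT B =====
-- literal transliteration of Source B: comprehension = filter; next(enumerate…) = findIdx?;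
-- list.insert pos with 0 ≤ pos ≤ len(out) = List.insertIdx
def set_header_py_alt (headers : List (String × String)) (name : String) (value : String) : List (String × String) :=
  let lname := PySem.Str.lower name
  let out := headers.filter (fun kv => !(PySem.Str.lower kv.1 == lname))
  match headers.findIdx? (fun kv => PySem.Str.lower kv.1 == lname) with
  | none => out ++ [(name, value)]
  | some pos => out.insertIdx pos (name, value)

-- ===== PRECONDITION & SPEC =====
def Spec_set_header_py (headers : List (String × String)) (name : String) (value : String) (out : List (String × String)) : Prop := out = set_header_py_alt headers name value
instance (headers : List (String × String)) (name : String) (value : String) (out : List (String × String)) : Decidable (Spec_set_header_py headers name value out) := by unfold Spec_set_header_py; infer_instance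

-- ===== CLAIM (what is proved, stated in full; the proofs are below) =====
def Claim_equal_set_header_py : Prop := ∀ (headers : List (String × String)) (name : String) (value : String), Dom_set_header_py headers name value → Spec_set_header_py headers name value (set_header_py headers name value)

-- ===== LEMMAS AND PROOFS =====

-- A's loop body as a named function (definitionally equal to the lambda in the port)
def pvStep (name value lname : String) :
    List (String × String) × Bool → String × String → List (String × String) × Bool :=
  fun st kv =>
    if PySem.Str.lower kv.1 == lname then
      if !st.2 then (st.1 ++ [(name, value)], true) else st
    else
      (st.1 ++ [kv], st.2)

theorem pvStep_match_t (name value lname : String) (acc : List (String × String))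
    (kv : String × String) (h : (PySem.Str.lower kv.1 == lname) = true) :
    pvStep name value lname (acc, true) kv = (acc, true) := by
  simp [pvStep, h]

theorem pvStep_match_f (name value lname : String) (acc : List (String × String))
    (kv : String × String) (h : (PySem.Str.lower kv.1 == lname) = true) :
    pvStep name value lname (acc, false) kv = (acc ++ [(name, value)], true) := by
  simp [pvStep, h]

theorem pvStep_nomatch (name value lname : String) (acc : List (String × String)) (b : Bool)
    (kv : String × String) (h : ¬ (PySem.Str.lower kv.1 == lname) = true) :
    pvStep name value lname (acc, b) kv = (acc ++ [kv], b) := by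
  simp [pvStep, h]

-- once replaced, A's loop just filters out the matching pairs
theorem pv_loop_true (name value lname : String)
    (hs : List (String × String)) (acc : List (String × String)) :
    hs.foldl (pvStep name value lname) (acc, true)
    = (acc ++ hs.filter (fun kv => !(PySem.Str.lower kv.1 == lname)), true) := by
  induction hs generalizing acc with
  | nil => simp
  | cons kv hs ih =>
    rw [List.foldl_cons]
    by_cases h : (PySem.Str.lower kv.1 == lname) = true
    · rw [pvStep_match_t name value lname acc kv h, ih]
      simp [h]
    · rw [pvStep_nomatch name value lname acc true kv h, ih]
      simp [h]

-- main induction: A's loop with an accumulator = accumulator ++ B's result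
theorem pv_main (name value lname : String)
    (hs : List (String × String)) (acc : List (String × String)) :
    (if !(hs.foldl (pvStep name value lname) (acc, false)).2 then
        (hs.foldl (pvStep name value lname) (acc, false)).1 ++ [(name, value)]
      else (hs.foldl (pvStep name value lname) (acc, false)).1)
    = acc ++
      (match hs.findIdx? (fun kv => PySem.Str.lower kv.1 == lname) with
       | none => hs.filter (fun kv => !(PySem.Str.lower kv.1 == lname)) ++ [(name, value)]
       | some pos =>
         (hs.filter (fun kv => !(PySem.Str.lower kv.1 == lname))).insertIdx pos (name, value)) := by
  induction hs generalizing acc with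
  | nil => simp
  | cons kv hs ih =>
    rw [List.foldl_cons]
    by_cases h : (PySem.Str.lower kv.1 == lname) = true
    · rw [pvStep_match_f name value lname acc kv h, pv_loop_true]
      simp [List.findIdx?_cons, h]
    · rw [pvStep_nomatch name value lname acc false kv h, ih]
      simp only [List.findIdx?_cons, h, List.filter_cons, Bool.not_false,
        if_false, Bool.false_eq_true]
      cases hfi : hs.findIdx? (fun kv => PySem.Str.lower kv.1 == lname) with
      | none => simp
      | some pos => simp [List.insertIdx_succ_cons]

-- ===== VERDICT (by name: the statement is the Claim_ definition above) =====
theorem set_header_py_spec : Claim_equal_set_header_py := by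
  intro headers name value _
  show set_header_py headers name value = set_header_py_alt headers name value
  unfold set_header_py set_header_py_alt
  exact pv_main name value (PySem.Str.lower name) headers []
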